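-- pv_equiv track=rewrite | github.com/oleksandr38kebab342/log-csv-git | nginx_log_parser.py | filter_logs
-- ===== SOURCE A (Python) =====
-- from typing import List, Dict, Optional
--
-- def filter_logs(logs: List[Dict[str, str]], filters: Dict[str, str]) -> List[Dict[str, str]]:
--     """Apply filters to the log data."""
--     if not filters:
--         return logs
--
--     filtered_logs = []
--     for log_entry in logs:
--         include = True
--         for field, value in filters.items():
--             if field in log_entry and value.lower() not in log_entry[field].lower():
--                 include = False
--                 break
--         if include:
--             filtered_logs.append(log_entry)
--
--     return filtered_logs
-- ===== SOURCE B (Python) =====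
-- from typing import List, Dict
--
-- def filter_logs(logs: List[Dict[str, str]], filters: Dict[str, str]) -> List[Dict[str, str]]:
--     """Apply filters to the log data by narrowing the list one filter at a time."""
--     result = logs
--     for field, value in filters.items():
--         v = value.lower()
--         result = [log for log in result if field not in log or v in log[field].lower()]
--     return result
-- ===== Notes on version B (the rewrite author's own statement) =====
-- stated objective: alternative
-- what changed: Transposed the loop nesting: instead of one pass over logs with an inner per-filter loop and break, B loops over the filters, narrowing the log list with one comprehension per filter (value.lower() computed once per filter instead of once per log).
import Mathlib
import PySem

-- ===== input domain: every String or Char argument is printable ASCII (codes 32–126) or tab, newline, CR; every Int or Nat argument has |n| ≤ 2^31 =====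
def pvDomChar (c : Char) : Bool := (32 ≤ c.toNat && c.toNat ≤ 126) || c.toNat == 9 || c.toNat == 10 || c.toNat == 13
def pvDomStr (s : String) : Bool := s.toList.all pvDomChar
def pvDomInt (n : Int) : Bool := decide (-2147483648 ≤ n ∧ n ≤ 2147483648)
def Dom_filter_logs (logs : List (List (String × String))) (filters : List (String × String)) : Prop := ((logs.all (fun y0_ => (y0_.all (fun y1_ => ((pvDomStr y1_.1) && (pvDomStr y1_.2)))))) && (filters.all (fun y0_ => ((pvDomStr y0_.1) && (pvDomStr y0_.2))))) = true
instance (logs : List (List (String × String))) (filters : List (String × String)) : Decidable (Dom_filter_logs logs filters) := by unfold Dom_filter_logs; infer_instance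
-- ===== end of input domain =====

-- B transposes the loop nesting: it narrows the log list one filter at a time instead of
-- scanning logs once with an inner per-filter loop and break; same return value, proved equal.


-- ===== PORT A =====
-- inner loop of A: 'for field, value in filters.items(): … break' with the include flag
def filter_logs_include (log_entry : List (String × String)) : List (String × String) → Bool
  | [] => true
  | (field, value) :: rest =>
    if (PySem.Dict.mk log_entry).contains field &&
       !(PySem.Str.isIn (PySem.Str.lower value)
          (PySem.Str.lower ((PySem.Dict.mk log_entry).getD field ""))) then
      false
    else
      filter_logs_include log_entry rest

def filter_logs (logs : List (List (String × String))) (filters : List (String × String)) : List (List (String × String)) :=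
  if filters = [] then logs
  else
    logs.foldl (fun filtered_logs log_entry =>
      if filter_logs_include log_entry filters then filtered_logs ++ [log_entry]
      else filtered_logs) []

-- ===== PORT B =====
def filter_logs_alt (logs : List (List (String × String))) (filters : List (String × String)) : List (List (String × String)) :=
  filters.foldl (fun result fv =>
    let v := PySem.Str.lower fv.2
    result.filter (fun log =>
      !((PySem.Dict.mk log).contains fv.1) ||
      PySem.Str.isIn v (PySem.Str.lower ((PySem.Dict.mk log).getD fv.1 "")))) logs

-- ===== PRECONDITION & SPEC =====
def Spec_filter_logs (logs : List (List (String × String))) (filters : List (String × String)) (out : List (List (String × String))) : Prop := out = filter_logs_alt logs filters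
instance (logs : List (List (String × String))) (filters : List (String × String)) (out : List (List (String × String))) : Decidable (Spec_filter_logs logs filters out) := by unfold Spec_filter_logs; infer_instance

-- ===== CLAIM (what is proved, stated in full; the proofs are below) =====
def Claim_equal_filter_logs : Prop := ∀ (logs : List (List (String × String))) (filters : List (String × String)), Dom_filter_logs logs filters → Spec_filter_logs logs filters (filter_logs logs filters)

-- ===== LEMMAS AND PROOFS =====

-- the per-filter test both programs apply to one log entry
def pvTest (fv : String × String) (log : List (String × String)) : Bool :=
  !((PySem.Dict.mk log).contains fv.1) ||
  PySem.Str.isIn (PySem.Str.lower fv.2) (PySem.Str.lower ((PySem.Dict.mk log).getD fv.1 ""))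

-- A's inner loop computes the conjunction of all per-filter tests
theorem include_eq_all (log : List (String × String)) (filters : List (String × String)) :
    filter_logs_include log filters = filters.all (fun fv => pvTest fv log) := by
  induction filters with
  | nil => rfl
  | cons fv rest ih =>
    obtain ⟨f, v⟩ := fv
    simp only [filter_logs_include, List.all_cons, pvTest, ih]
    cases h1 : (PySem.Dict.mk log).contains f <;>
      cases h2 : PySem.Str.isIn (PySem.Str.lower v)
        (PySem.Str.lower ((PySem.Dict.mk log).getD f "")) <;> simp

-- B's fold of filters over a shrinking list is one filter by the conjunction
theorem alt_eq_filter (filters : List (String × String)) (logs : List (List (String × String))) :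
    filter_logs_alt logs filters = logs.filter (fun log => filters.all (fun fv => pvTest fv log)) := by
  induction filters generalizing logs with
  | nil => simp [filter_logs_alt]
  | cons fv rest ih =>
    simp only [filter_logs_alt, List.foldl_cons] at ih ⊢
    rw [ih, List.filter_filter]
    apply List.filter_congr
    intro log _
    simp [pvTest, Bool.and_comm]

-- ===== VERDICT (by name: the statement is the Claim_ definition above) =====
theorem filter_logs_spec : Claim_equal_filter_logs := by
  intro logs filters _
  show filter_logs logs filters = filter_logs_alt logs filters
  rw [alt_eq_filter]
  unfold filter_logs
  split
  · subst ‹filters = []›; simp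
  · rw [PySem.List.foldl_append_if]
    simp [include_eq_all]
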